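-- pv_equiv track=rewrite | github.com/alex0000-ops/Vysledky-algoritmov | GSP/GSP.py | generate_candidates_k2
-- ===== SOURCE A (Python) =====
-- def generate_candidates_k2(freq_items: list, sequences: list) -> set:
--     """
--     Generuje kandidátov dĺžky k=2 z frekventovaných 1-prvkových vzorov.
--
--     Namiesto kombinácie všetkých dvojíc (kartézsky súčin) prehľadáme
--     skutočné sekvencie a vyberieme len dvojice, ktoré sa v dátach naozaj
--     vyskytujú. Tým sa výrazne zredukuje počet kandidátov.
--
--     Parametre
--     ---------
--     freq_items : zoznam frekventovaných 1-prvkových vzorov (napr. [('T1',), ...])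
--     sequences  : zoznam všetkých okien
--
--     Vracia
--     ------
--     set n-tíc tvaru (token_i, token_j), kde i < j v rámci nejakej sekvencie
--     """
--     freq_set = {p[0] for p in freq_items}
--     observed = set()
--     for seq in sequences:
--         for i in range(len(seq)):
--             for j in range(i + 1, len(seq)):
--                 if seq[i] in freq_set and seq[j] in freq_set:
--                     observed.add((seq[i], seq[j]))
--     return observed
-- ===== SOURCE B (Python) =====
-- def generate_candidates_k2(freq_items: list, sequences: list) -> set:
--     """Alternative: per sequence, precompute for each position the list of distinct
--     frequent tokens occurring after it (first-appearance order), then pair each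
--     frequent token with that distinct suffix list; avoids the O(L^2) inner scan."""
--     freq = {p[0] for p in freq_items}
--     observed = set()
--     for seq in sequences:
--         n = len(seq)
--         snaps = [None] * n  # snaps[i] = distinct frequent tokens of seq[i+1:]
--         cur = []
--         for i in range(n - 1, -1, -1):
--             snaps[i] = cur
--             t = seq[i]
--             if t in freq:
--                 cur = [t] + [u for u in cur if u != t]
--         for i in range(n):
--             t = seq[i]
--             if t in freq:
--                 for u in snaps[i]:
--                     observed.add((t, u))
--     return observed
-- ===== Notes on version B (the rewrite author's own statement) =====
-- stated objective: faster
-- what changed: Instead of scanning all index pairs (i,j) per sequence, B precomputes for every position the list of distinct frequent tokens occurring after it (one right-to-left pass) and pairs each frequent token only with that deduplicated suffix list, so the inner scan over positions becomes a scan over distinct tokens.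
import Mathlib
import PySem

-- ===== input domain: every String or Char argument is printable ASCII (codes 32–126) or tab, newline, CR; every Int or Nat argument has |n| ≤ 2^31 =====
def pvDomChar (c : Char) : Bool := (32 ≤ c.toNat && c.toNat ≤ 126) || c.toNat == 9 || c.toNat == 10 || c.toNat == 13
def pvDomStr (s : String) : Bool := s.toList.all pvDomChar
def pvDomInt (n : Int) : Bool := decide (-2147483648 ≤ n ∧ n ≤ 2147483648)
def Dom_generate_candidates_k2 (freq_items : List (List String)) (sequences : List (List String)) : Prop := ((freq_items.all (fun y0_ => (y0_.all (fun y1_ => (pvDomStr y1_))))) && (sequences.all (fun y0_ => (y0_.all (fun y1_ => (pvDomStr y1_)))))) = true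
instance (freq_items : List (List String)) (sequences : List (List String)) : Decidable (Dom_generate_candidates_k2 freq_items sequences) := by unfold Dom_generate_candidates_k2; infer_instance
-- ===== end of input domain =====

-- B precomputes, per sequence, the distinct-frequent-suffix list for each position
-- (first-appearance order) and pairs each frequent token with it, instead of A's
-- quadratic scan over all index pairs; same set, different algorithm.

-- ===== PORT A =====
def generate_candidates_k2 (freq_items : List (List String)) (sequences : List (List String)) : List (String × String) :=
  let freq_set : PySem.Set String := PySem.Set.ofList (freq_items.map (fun p => PySem.List.pyGetD p 0 ""))
  sequences.foldl (fun observed seq =>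
    (PySem.List.pyRange 0 (PySem.List.len seq)).foldl (fun observed i =>
      (PySem.List.pyRange (i + 1) (PySem.List.len seq)).foldl (fun observed j =>
        if freq_set.contains (PySem.List.pyGetD seq i "") && freq_set.contains (PySem.List.pyGetD seq j "") then
          PySem.Set.add observed (PySem.List.pyGetD seq i "", PySem.List.pyGetD seq j "")
        else observed) observed) observed) PySem.Set.empty

-- ===== PORT B =====
-- snaps: for each position i the distinct frequent tokens of seq[i+1:] in
-- first-appearance order (Python builds the same lists scanning i downwards);
-- .1 = the per-position lists, .2 = the running list `cur`.
def pvSnaps (freq_set : PySem.Set String) : List String → List (List String) × List String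
  | [] => ([], [])
  | t :: rest =>
    let p := pvSnaps freq_set rest
    (p.2 :: p.1, if freq_set.contains t then t :: p.2.filter (fun u => u != t) else p.2)

def generate_candidates_k2_alt (freq_items : List (List String)) (sequences : List (List String)) : List (String × String) :=
  let freq_set : PySem.Set String := PySem.Set.ofList (freq_items.map (fun p => PySem.List.pyGetD p 0 ""))
  sequences.foldl (fun observed seq =>
    (seq.zip (pvSnaps freq_set seq).1).foldl (fun observed tu =>
      if freq_set.contains tu.1 then
        tu.2.foldl (fun ob u => PySem.Set.add ob (tu.1, u)) observed
      else observed) observed) PySem.Set.empty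

-- ===== PRECONDITION & SPEC =====
-- Pre_ excludes exactly the inputs where A raises: freq_items containing an
-- empty pattern, on which `p[0]` is an IndexError (B raises there too).
def Pre_generate_candidates_k2 (freq_items : List (List String)) (sequences : List (List String)) : Prop :=
  ∀ p ∈ freq_items, p ≠ []
instance (freq_items : List (List String)) (sequences : List (List String)) : Decidable (Pre_generate_candidates_k2 freq_items sequences) := by unfold Pre_generate_candidates_k2; infer_instance
def pvWitness_generate_candidates_k2 : List (List String) × List (List String) :=
  ([["a"], ["b"]], [["a", "b", "a", "c"], ["b", "b"]])

def Spec_generate_candidates_k2 (freq_items : List (List String)) (sequences : List (List String)) (out : List (String × String)) : Prop := out = generate_candidates_k2_alt freq_items sequences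
instance (freq_items : List (List String)) (sequences : List (List String)) (out : List (String × String)) : Decidable (Spec_generate_candidates_k2 freq_items sequences out) := by unfold Spec_generate_candidates_k2; infer_instance

-- ===== CLAIM (what is proved, stated in full; the proofs are below) =====
def Claim_equal_generate_candidates_k2 : Prop := ∀ (freq_items : List (List String)) (sequences : List (List String)), Dom_generate_candidates_k2 freq_items sequences → Pre_generate_candidates_k2 freq_items sequences → Spec_generate_candidates_k2 freq_items sequences (generate_candidates_k2 freq_items sequences)

-- ===== LEMMAS AND PROOFS =====

-- folding Set.add with a distinguished head element x of the accumulator: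
-- x stays in front and occurrences of x in the input are skipped
theorem pv_foldl_add_cons {α : Type} [BEq α] [LawfulBEq α] (l : List α) (s : List α) (x : α) :
    List.foldl PySem.Set.add (x :: s) l = x :: List.foldl PySem.Set.add s (l.filter (fun u => u != x)) := by
  induction l generalizing s with
  | nil => simp
  | cons a l ih =>
    by_cases hax : a = x
    · subst hax
      have h1 : PySem.Set.add (a :: s) a = a :: s := PySem.Set.add_of_mem (List.mem_cons_self ..)
      rw [List.foldl_cons, h1, List.filter_cons_of_neg (by simp), ih]
    · have h2 : PySem.Set.add (x :: s) a = x :: PySem.Set.add s a := by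
        by_cases has : a ∈ s
        · rw [PySem.Set.add_of_mem (by simp [has]), PySem.Set.add_of_mem has]
        · rw [PySem.Set.add_of_not_mem (by simp [has, hax]), PySem.Set.add_of_not_mem has]
          rfl
      have hf : List.filter (fun u => u != x) (a :: l) = a :: List.filter (fun u => u != x) l := by
        simp [hax]
      rw [List.foldl_cons, h2, hf, List.foldl_cons, ih]

-- filtering commutes with dedup-insertion folding
theorem pv_foldl_add_filter {α : Type} [BEq α] [LawfulBEq α] (l : List α) (s : List α) (p : α → Bool) :
    (List.foldl PySem.Set.add s l).filter p = List.foldl PySem.Set.add (s.filter p) (l.filter p) := by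
  induction l generalizing s with
  | nil => simp
  | cons a l ih =>
    by_cases hpa : p a = true
    · have h2 : (PySem.Set.add s a).filter p = PySem.Set.add (s.filter p) a := by
        by_cases has : a ∈ s
        · rw [PySem.Set.add_of_mem has, PySem.Set.add_of_mem (List.mem_filter.mpr ⟨has, hpa⟩)]
        · rw [PySem.Set.add_of_not_mem has,
            PySem.Set.add_of_not_mem (fun h => has (List.mem_filter.mp h).1)]
          simp [hpa]
      rw [List.foldl_cons, ih, h2, List.filter_cons_of_pos hpa, List.foldl_cons]
    · have h2 : (PySem.Set.add s a).filter p = s.filter p := by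
        by_cases has : a ∈ s
        · rw [PySem.Set.add_of_mem has]
        · rw [PySem.Set.add_of_not_mem has]
          simp [hpa]
      rw [List.foldl_cons, ih, h2, List.filter_cons_of_neg (by simp [hpa])]

theorem pv_ofList_cons {α : Type} [BEq α] [LawfulBEq α] (x : α) (l : List α) :
    PySem.Set.ofList (x :: l) = x :: (PySem.Set.ofList l).filter (fun u => u != x) := by
  rw [PySem.Set.ofList_eq_foldl, PySem.Set.ofList_eq_foldl]
  have h0 : PySem.Set.add ([] : List α) x = [x] := by simp [PySem.Set.add]
  rw [List.foldl_cons, h0, pv_foldl_add_cons, pv_foldl_add_filter]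
  rfl

-- once (t, x) is in the set, occurrences of x in the input are no-ops
theorem pv_foldl_pair_skip (l : List String) (ob : PySem.Set (String × String)) (t x : String)
    (hx : (t, x) ∈ ob) :
    List.foldl (fun ob u => PySem.Set.add ob (t, u)) ob (l.filter (fun u => u != x)) =
    List.foldl (fun ob u => PySem.Set.add ob (t, u)) ob l := by
  induction l generalizing ob with
  | nil => rfl
  | cons a l ih =>
    by_cases hax : a = x
    · subst hax
      rw [List.filter_cons_of_neg (by simp), List.foldl_cons, PySem.Set.add_of_mem hx, ih _ hx]
    · rw [List.filter_cons_of_pos (by simp [hax]), List.foldl_cons, List.foldl_cons,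
        ih _ ((PySem.Set.mem_add ..).mpr (Or.inl hx))]

-- pairing t with the deduplicated list inserts the same set as pairing with the raw list
theorem pv_foldl_pair_dedup (l : List String) (ob : PySem.Set (String × String)) (t : String) :
    List.foldl (fun ob u => PySem.Set.add ob (t, u)) ob (PySem.Set.ofList l) =
    List.foldl (fun ob u => PySem.Set.add ob (t, u)) ob l := by
  induction l generalizing ob with
  | nil => rfl
  | cons x l ih =>
    rw [pv_ofList_cons, List.foldl_cons, List.foldl_cons,
      pv_foldl_pair_skip _ _ _ _ ((PySem.Set.mem_add ..).mpr (Or.inr rfl)), ih]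

-- A's inner j-loop = B's inner loop over the deduplicated filtered suffix
theorem pv_inner_eq (freq_set : PySem.Set String) (t : String) (rest : List String)
    (ob : PySem.Set (String × String)) :
    List.foldl (fun ob u => if freq_set.contains t && freq_set.contains u then PySem.Set.add ob (t, u) else ob) ob rest =
    (if freq_set.contains t then
      List.foldl (fun ob u => PySem.Set.add ob (t, u)) ob (PySem.Set.ofList (rest.filter freq_set.contains))
    else ob) := by
  by_cases ht : freq_set.contains t = true
  · rw [if_pos ht, pv_foldl_pair_dedup, List.foldl_filter]
    simp only [ht, Bool.true_and]
  · have ht' : freq_set.contains t = false := by simpa using ht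
    rw [if_neg ht]
    simp only [ht', Bool.false_and]
    induction rest generalizing ob with
    | nil => rfl
    | cons a l ih => rw [List.foldl_cons]; exact ih ob

theorem pv_snaps_snd (freq_set : PySem.Set String) (seq : List String) :
    (pvSnaps freq_set seq).2 = PySem.Set.ofList (seq.filter freq_set.contains) := by
  induction seq with
  | nil => rfl
  | cons t rest ih =>
    have hd : (pvSnaps freq_set (t :: rest)).2 =
        if freq_set.contains t then t :: ((pvSnaps freq_set rest).2).filter (fun u => u != t)
        else (pvSnaps freq_set rest).2 := rfl
    by_cases ht : freq_set.contains t = true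
    · rw [hd, if_pos ht, List.filter_cons_of_pos ht, pv_ofList_cons, ih]
    · rw [hd, if_neg ht, List.filter_cons_of_neg (by simpa using ht), ih]

-- index loop over positions = structural loop over tails (generic body G)
theorem pv_range_tails {β : Type} (G : String → List String → β → β) (seq : List String) (ob : β)
    (loopG : β → List String → β)
    (hnil : ∀ ob, loopG ob [] = ob)
    (hcons : ∀ ob t rest, loopG ob (t :: rest) = loopG (G t rest ob) rest) :
    (PySem.List.pyRange 0 (PySem.List.len seq)).foldl
      (fun ob i => G (PySem.List.pyGetD seq i "") (List.drop (i + 1).toNat seq) ob) ob =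
    loopG ob seq := by
  induction seq generalizing ob with
  | nil => rw [hnil]; rfl
  | cons t rest ih =>
    rw [hcons]
    have hlen : PySem.List.len (t :: rest) = ((rest.length + 1 : Nat) : Int) := by
      simp [PySem.List.len]
    rw [hlen, PySem.List.pyRange_zero]
    have hn : ((rest.length + 1 : Nat) : Int).toNat = rest.length + 1 := by omega
    rw [hn, List.range_succ_eq_map, List.map_cons, List.foldl_cons, List.map_map, List.foldl_map]
    have h0 : G (PySem.List.pyGetD (t :: rest) ((0 : Nat) : Int) "") (List.drop (((0:Nat):Int) + 1).toNat (t :: rest)) ob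
        = G t rest ob := by
      rw [PySem.List.pyGetD_natCast]
      norm_num
    rw [h0]
    rw [← ih (G t rest ob)]
    rw [PySem.List.pyRange_zero]
    have hlen2 : (PySem.List.len rest).toNat = rest.length := by simp [PySem.List.len]
    rw [hlen2, List.foldl_map]
    apply PySem.List.foldl_congr_mem
    intro acc k _
    have e2 : PySem.List.pyGetD (t :: rest) (((k+1 : Nat) : Int)) "" = PySem.List.pyGetD rest ((k : Nat) : Int) "" := by
      rw [PySem.List.pyGetD_natCast, PySem.List.pyGetD_natCast]
      rfl
    have e3 : ((((k+1 : Nat) : Int)) + 1).toNat = k + 2 := by omega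
    have e4 : (((k : Nat) : Int) + 1).toNat = k + 1 := by omega
    simp only [Function.comp, Nat.succ_eq_add_one, e2, e3, e4]
    rfl

theorem pv_seq_eq (freq_set : PySem.Set String) (seq : List String) (ob : PySem.Set (String × String)) :
    (PySem.List.pyRange 0 (PySem.List.len seq)).foldl (fun observed i =>
      (PySem.List.pyRange (i + 1) (PySem.List.len seq)).foldl (fun observed j =>
        if freq_set.contains (PySem.List.pyGetD seq i "") && freq_set.contains (PySem.List.pyGetD seq j "") then
          PySem.Set.add observed (PySem.List.pyGetD seq i "", PySem.List.pyGetD seq j "")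
        else observed) observed) ob =
    (seq.zip (pvSnaps freq_set seq).1).foldl (fun observed tu =>
      if freq_set.contains tu.1 then
        tu.2.foldl (fun ob u => PySem.Set.add ob (tu.1, u)) observed
      else observed) ob := by
  have step1 : ∀ (observed : PySem.Set (String × String)), ∀ i ∈ PySem.List.pyRange 0 (PySem.List.len seq),
      (PySem.List.pyRange (i + 1) (PySem.List.len seq)).foldl (fun observed j =>
        if freq_set.contains (PySem.List.pyGetD seq i "") && freq_set.contains (PySem.List.pyGetD seq j "") then
          PySem.Set.add observed (PySem.List.pyGetD seq i "", PySem.List.pyGetD seq j "")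
        else observed) observed =
      (List.drop (i + 1).toNat seq).foldl (fun observed u =>
        if freq_set.contains (PySem.List.pyGetD seq i "") && freq_set.contains u then
          PySem.Set.add observed (PySem.List.pyGetD seq i "", u)
        else observed) observed := by
    intro observed i hi
    have h0i : (0 : Int) ≤ i := ((PySem.List.mem_pyRange_one ..).mp hi).1
    exact PySem.List.foldl_pyRange_pyGetD seq ""
      (fun observed u =>
        if freq_set.contains (PySem.List.pyGetD seq i "") && freq_set.contains u then
          PySem.Set.add observed (PySem.List.pyGetD seq i "", u)
        else observed) observed (by omega)
  rw [PySem.List.foldl_congr_mem _ _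
    (fun ob i => (List.drop (i + 1).toNat seq).foldl (fun observed u =>
        if freq_set.contains (PySem.List.pyGetD seq i "") && freq_set.contains u then
          PySem.Set.add observed (PySem.List.pyGetD seq i "", u)
        else observed) ob) ob step1]
  exact pv_range_tails
    (fun t rest ob => rest.foldl (fun ob u =>
      if freq_set.contains t && freq_set.contains u then PySem.Set.add ob (t, u) else ob) ob)
    seq ob
    (fun ob s => (s.zip (pvSnaps freq_set s).1).foldl (fun observed tu =>
      if freq_set.contains tu.1 then
        tu.2.foldl (fun ob u => PySem.Set.add ob (tu.1, u)) observed
      else observed) ob)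
    (fun ob => rfl)
    (by
      intro ob t rest
      dsimp only
      have hz : (t :: rest).zip (pvSnaps freq_set (t :: rest)).1
          = (t, (pvSnaps freq_set rest).2) :: rest.zip (pvSnaps freq_set rest).1 := rfl
      rw [hz, List.foldl_cons]
      congr 1
      rw [pv_inner_eq, pv_snaps_snd])

-- ===== VERDICT (by name: the statement is the Claim_ definition above) =====
theorem generate_candidates_k2_spec : Claim_equal_generate_candidates_k2 := by
  intro freq_items sequences _ _
  unfold Spec_generate_candidates_k2 generate_candidates_k2 generate_candidates_k2_alt
  exact PySem.List.foldl_congr_mem _ _ _ _ (fun ob seq _ => pv_seq_eq _ seq ob)
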